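-- pv_equiv track=rewrite | github.com/pypi-data/pypi-mirror-396 | packages/jdcat/jdcat-1.2.0-py3-none-any.whl/mitmproxy/local_bridge_addon.py | _is_static_by_url
-- ===== SOURCE A (Python) =====
-- def _is_static_by_url(url: str) -> bool:
--     lower = (url or "").split("?")[0].lower()
--     exts = (
--         ".js", ".mjs", ".css", ".map",
--         ".png", ".jpg", ".jpeg", ".gif", ".svg", ".ico",
--         ".woff", ".woff2", ".ttf", ".eot", ".otf",
--         ".mp4", ".webm", ".avi", ".mov",
--         ".mp3", ".wav", ".flac",
--         ".pdf", ".zip", ".rar", ".7z"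
--     )
--     return any(lower.endswith(x) for x in exts)
-- ===== SOURCE B (Python) =====
-- _STATIC_EXTS = frozenset((
--     ".js", ".mjs", ".css", ".map",
--     ".png", ".jpg", ".jpeg", ".gif", ".svg", ".ico",
--     ".woff", ".woff2", ".ttf", ".eot", ".otf",
--     ".mp4", ".webm", ".avi", ".mov",
--     ".mp3", ".wav", ".flac",
--     ".pdf", ".zip", ".rar", ".7z"
-- ))
--
--
-- def _is_static_by_url(url: str) -> bool:
--     lower = (url or "").split("?")[0].lower()
--     i = lower.rfind('.')
--     ext = lower[i:] if i != -1 else ''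
--     return ext in _STATIC_EXTS
-- ===== Notes on version B (the rewrite author's own statement) =====
-- stated objective: idiomatic
-- what changed: Replaces the per-extension endswith scan over 26 suffixes with a single rfind of the last dot, one slice, and one frozenset membership lookup.
import Mathlib
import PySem

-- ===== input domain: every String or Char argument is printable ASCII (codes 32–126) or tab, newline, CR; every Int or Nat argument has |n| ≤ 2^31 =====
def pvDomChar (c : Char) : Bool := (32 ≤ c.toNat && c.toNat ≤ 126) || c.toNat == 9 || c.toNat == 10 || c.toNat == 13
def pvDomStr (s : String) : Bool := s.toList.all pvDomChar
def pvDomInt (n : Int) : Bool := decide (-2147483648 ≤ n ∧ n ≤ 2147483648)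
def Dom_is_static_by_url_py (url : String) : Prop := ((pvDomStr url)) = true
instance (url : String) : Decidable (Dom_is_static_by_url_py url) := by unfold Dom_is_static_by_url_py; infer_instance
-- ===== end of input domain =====

-- B replaces A's scan of 26 endswith checks by extracting the suffix from the last dot (rfind + slice) and one set-membership lookup (idiomatic; same return value).

-- ===== PORT A =====
def is_static_by_url_py (url : String) : Bool :=
  -- lower = (url or "").split("?")[0].lower(); '?' ≠ '' so split? is some, and split never returns [] so [0] exists (getD defaults are dead)
  let base := if url == "" then "" else url
  let lower := PySem.Str.lower ((PySem.List.pyGet? ((PySem.Str.split? base "?").getD []) 0).getD "")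
  let exts : List String := [".js", ".mjs", ".css", ".map",
    ".png", ".jpg", ".jpeg", ".gif", ".svg", ".ico",
    ".woff", ".woff2", ".ttf", ".eot", ".otf",
    ".mp4", ".webm", ".avi", ".mov",
    ".mp3", ".wav", ".flac",
    ".pdf", ".zip", ".rar", ".7z"]
  exts.any (fun x => PySem.Str.endswith lower x)

-- ===== PORT B =====
-- module-level frozenset _STATIC_EXTS of Source B
def pvStaticExts : PySem.Set String := PySem.Set.ofList [".js", ".mjs", ".css", ".map",
    ".png", ".jpg", ".jpeg", ".gif", ".svg", ".ico",
    ".woff", ".woff2", ".ttf", ".eot", ".otf",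
    ".mp4", ".webm", ".avi", ".mov",
    ".mp3", ".wav", ".flac",
    ".pdf", ".zip", ".rar", ".7z"]

def is_static_by_url_py_alt (url : String) : Bool :=
  -- same preamble as A: lower = (url or "").split("?")[0].lower()
  let base := if url == "" then "" else url
  let lower := PySem.Str.lower ((PySem.List.pyGet? ((PySem.Str.split? base "?").getD []) 0).getD "")
  let i := PySem.Str.rfind lower "."
  let ext := if i != -1 then PySem.Str.slice lower (some i) none else ""
  pvStaticExts.contains ext

-- ===== PRECONDITION & SPEC =====
def Spec_is_static_by_url_py (url : String) (out : Bool) : Prop := out = is_static_by_url_py_alt url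
instance (url : String) (out : Bool) : Decidable (Spec_is_static_by_url_py url out) := by unfold Spec_is_static_by_url_py; infer_instance

-- ===== CLAIM (what is proved, stated in full; the proofs are below) =====
def Claim_equal_is_static_by_url_py : Prop := ∀ (url : String), Dom_is_static_by_url_py url → Spec_is_static_by_url_py url (is_static_by_url_py url)

-- ===== LEMMAS AND PROOFS =====

-- [a] <+: t means t's head is a
theorem pv_singleton_prefix (a : Char) (t : List Char) : [a] <+: t ↔ t.head? = some a := by
  constructor
  · rintro ⟨r, rfl⟩; rfl
  · intro h
    cases t with
    | nil => simp at h
    | cons b t => simp at h; subst h; exact ⟨t, rfl⟩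

-- rfind.go returns -1 when sub is nowhere a prefix up to index i
theorem pv_go_neg (s sub : List Char) (i : Nat)
    (h : ∀ j, j ≤ i → ¬ sub <+: s.drop j) :
    PySem.Chars.rfind.go s sub i = -1 := by
  induction i with
  | zero => simp [PySem.Chars.rfind.go, List.isPrefixOf_iff_prefix]; exact h 0 (le_refl 0)
  | succ j ih =>
      have hj := h (j + 1) (le_refl _)
      simp [PySem.Chars.rfind.go, List.isPrefixOf_iff_prefix, hj]
      exact ih (fun m hm => h m (Nat.le_succ_of_le hm))

-- rfind.go finds the highest prefix position k when k ≤ i and nothing above k matches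
theorem pv_go_pos (s sub : List Char) (k : Nat)
    (hk : sub <+: s.drop k)
    (habove : ∀ j, k < j → ¬ sub <+: s.drop j) :
    ∀ i, k ≤ i → PySem.Chars.rfind.go s sub i = (k : Int) := by
  intro i
  induction i with
  | zero =>
      intro h; interval_cases k
      simp only [List.drop_zero] at hk
      simp [PySem.Chars.rfind.go, List.isPrefixOf_iff_prefix, hk]
  | succ j ih =>
      intro h
      rcases Nat.eq_or_lt_of_le h with heq | hlt
      · subst heq; simp [PySem.Chars.rfind.go, List.isPrefixOf_iff_prefix, hk]
      · have hj : k ≤ j := Nat.lt_succ_iff.mp hlt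
        have ha := habove (j + 1) (Nat.lt_succ_of_le hj)
        simp [PySem.Chars.rfind.go, List.isPrefixOf_iff_prefix, ha, ih hj]

-- rfind l "." = -1 exactly when l has no dot
theorem pv_rfind_neg (l : List Char) (h : '.' ∉ l) :
    PySem.Chars.rfind l ['.'] = -1 := by
  refine pv_go_neg l ['.'] l.length (fun j _ hpre => ?_)
  rw [pv_singleton_prefix, List.head?_drop] at hpre
  exact h (List.mem_iff_getElem?.mpr ⟨j, hpre⟩)

-- rfind l "." = k when l[k] = '.' and no dot after k
theorem pv_rfind_pos (l : List Char) (k : Nat)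
    (hk : l[k]? = some '.')
    (habove : ∀ j, k < j → l[j]? ≠ some '.') :
    PySem.Chars.rfind l ['.'] = (k : Int) := by
  have hlen : k < l.length := by
    by_contra h
    simp [List.getElem?_eq_none (by omega : l.length ≤ k)] at hk
  refine pv_go_pos l ['.'] k ?_ ?_ l.length (Nat.le_of_lt hlen)
  · exact (pv_singleton_prefix _ _).mpr (by rwa [List.head?_drop])
  · intro j hj hpre
    exact habove j hj (by rw [← List.head?_drop]; exact (pv_singleton_prefix _ _).mp hpre)

-- the core equivalence, for an arbitrary (already lowered) string s
theorem pv_main (s : String) :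
    ([".js", ".mjs", ".css", ".map", ".png", ".jpg", ".jpeg", ".gif", ".svg", ".ico",
      ".woff", ".woff2", ".ttf", ".eot", ".otf", ".mp4", ".webm", ".avi", ".mov",
      ".mp3", ".wav", ".flac", ".pdf", ".zip", ".rar", ".7z"].any
        (fun x => PySem.Str.endswith s x)) =
    pvStaticExts.contains
      (if (PySem.Str.rfind s "." != -1) then PySem.Str.slice s (some (PySem.Str.rfind s ".")) none else "") := by
  set l := s.toList with hl
  set exts : List String := [".js", ".mjs", ".css", ".map", ".png", ".jpg", ".jpeg", ".gif",
    ".svg", ".ico", ".woff", ".woff2", ".ttf", ".eot", ".otf", ".mp4", ".webm", ".avi", ".mov",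
    ".mp3", ".wav", ".flac", ".pdf", ".zip", ".rar", ".7z"] with hexts
  -- every extension in the table starts with '.' and has no second dot
  have hshape : ∀ x ∈ exts, x.toList.head? = some '.' ∧ '.' ∉ x.toList.tail := by decide
  have hdotstr : ".".toList = ['.'] := by decide
  by_cases hdot : '.' ∈ l
  · -- there is a dot: the last one is at k := findGreatest
    obtain ⟨j0, hj0⟩ := List.mem_iff_getElem?.mp hdot
    have hj0len : j0 < l.length := (List.getElem?_eq_some_iff.mp hj0).1
    set k := Nat.findGreatest (fun j => l[j]? = some '.') l.length with hkdef
    have hkP : l[k]? = some '.' := Nat.findGreatest_spec (P := fun j => l[j]? = some '.') (Nat.le_of_lt hj0len) hj0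
    have hgreat : ∀ j, k < j → l[j]? ≠ some '.' := by
      intro j hj
      by_cases hjl : j ≤ l.length
      · exact Nat.findGreatest_is_greatest (P := fun j => l[j]? = some '.') hj hjl
      · rw [List.getElem?_eq_none (by omega)]; simp
    have hrf : PySem.Str.rfind s "." = (k : Int) := by
      rw [PySem.Str.rfind_eq, hdotstr]; exact pv_rfind_pos l k hkP hgreat
    rw [hrf]
    have hcond : ((k : Int) != -1) = true := by simp [bne_iff_ne]
    rw [hcond, if_pos rfl]
    have hext : (PySem.Str.slice s (some (k : Int)) none).toList = l.drop k := by
      rw [PySem.Str.toList_slice, PySem.Chars.slice_eq_listSlice, PySem.List.slice_from_natCast]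
    rw [Bool.eq_iff_iff, List.any_eq_true]
    unfold pvStaticExts
    rw [PySem.Set.contains, List.contains_iff_mem, PySem.Set.mem_ofList, ← hexts]
    constructor
    · rintro ⟨x, hx, hsw⟩
      rw [PySem.Str.endswith_eq] at hsw
      obtain ⟨p, hp⟩ := (PySem.Chars.endswith_iff _ _).mp hsw
      have hpl : p ++ x.toList = l := hp
      obtain ⟨hhead, htail⟩ := hshape x hx
      -- the last dot of l is exactly at p.length
      have hPp : l[p.length]? = some '.' := by
        rw [← hpl, List.getElem?_append_right (le_refl _), Nat.sub_self,
          ← List.head?_eq_getElem?]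
        exact hhead
      have hple : p.length ≤ k := by
        by_contra hgt
        exact hgreat p.length (by omega) hPp
      have hkeq : p.length = k := by
        rcases Nat.eq_or_lt_of_le hple with h | h
        · exact h
        · exfalso
          -- a dot strictly after p.length would sit in x's tail
          have hkx : x.toList[k - p.length]? = some '.' := by
            rw [← hpl, List.getElem?_append_right (by omega)] at hkP
            exact hkP
          refine htail ?_
          rcases hx' : x.toList with _ | ⟨c, t⟩
          · rw [hx'] at hkx; simp at hkx
          · rw [hx'] at hkx
            rw [List.getElem?_cons, if_neg (by omega)] at hkx
            simp only [List.tail_cons]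
            refine List.mem_iff_getElem?.mpr ⟨k - p.length - 1, ?_⟩
            have heq : k - p.length - 1 + 1 = k - p.length := by omega
            simpa [heq] using hkx
      have hxe : PySem.Str.slice s (some (k : Int)) none = x := by
        apply String.toList_inj.mp
        rw [hext, ← hkeq, ← hpl, List.drop_left]
      exact hxe ▸ hx
    · intro hmem
      refine ⟨_, hmem, ?_⟩
      rw [PySem.Str.endswith_eq]
      apply (PySem.Chars.endswith_iff _ _).mpr
      rw [hext]
      exact List.drop_suffix k l
  · -- no dot anywhere: rfind is -1, ext is "", both sides are false
    have hrf : PySem.Str.rfind s "." = -1 := by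
      rw [PySem.Str.rfind_eq, hdotstr]; exact pv_rfind_neg l hdot
    rw [hrf, show ((-1 : Int) != -1) = false from rfl, if_neg (by simp),
      show pvStaticExts.contains "" = false from by decide, List.any_eq_false]
    intro x hx hsw
    rw [PySem.Str.endswith_eq] at hsw
    have hsuf := (PySem.Chars.endswith_iff _ _).mp hsw
    exact hdot (hsuf.subset (List.mem_of_mem_head? (hshape x hx).1))

-- ===== VERDICT (by name: the statement is the Claim_ definition above) =====
theorem is_static_by_url_py_spec : Claim_equal_is_static_by_url_py := by
  intro url _
  unfold Spec_is_static_by_url_py is_static_by_url_py is_static_by_url_py_alt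
  exact pv_main _
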